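-- pv_equiv track=rewrite | github.com/google-research/runtime-error-prediction | core/data/process.py | get_step_limit
-- ===== SOURCE A (Python) =====
-- def get_step_limit(lines):
--   """Computes the maximum number of IPA-GNN steps allowed for a program."""
--   step_limit = 1  # Start with one step for reaching exit.
--   indents = []
--   for line in lines:
--     indent = len(line) - len(line.lstrip())
--     while indents and indent <= indents[-1]:
--       indents.pop()
--     step_limit += 2 ** len(indents)
--     if (line.lstrip().startswith('for') or line.lstrip().startswith('while')):
--       indents.append(indent)
--       # We add steps at both levels of indentation for loops.
--       # Before for the initial condition check, after for subsequent condition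
--       # checks.
--       step_limit += 2 ** len(indents)
--   return step_limit
-- ===== SOURCE B (Python) =====
-- def get_step_limit(lines):
--   """Computes the maximum number of IPA-GNN steps allowed for a program."""
--   def block(i, depth, thresh):
--     # Sum contributions of the block of lines starting at i whose indent
--     # exceeds thresh, at nesting depth `depth`; returns (sum, next index).
--     total = 0
--     while i < len(lines):
--       stripped = lines[i].lstrip()
--       indent = len(lines[i]) - len(stripped)
--       if indent <= thresh:
--         break
--       total += 2 ** depth
--       i += 1
--       if stripped.startswith('for') or stripped.startswith('while'):
--         total += 2 ** (depth + 1)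
--         sub, i = block(i, depth + 1, indent)
--         total += sub
--     return total, i
--   return 1 + block(0, 0, -1)[0]
-- ===== Notes on version B (the rewrite author's own statement) =====
-- stated objective: alternative
-- what changed: Replaced the single pass with an explicit monotonic indent stack by a recursive descent over the implied nested-block tree: a helper consumes lines whose indent exceeds a threshold at a given depth and recurses into loop bodies.
import Mathlib
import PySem

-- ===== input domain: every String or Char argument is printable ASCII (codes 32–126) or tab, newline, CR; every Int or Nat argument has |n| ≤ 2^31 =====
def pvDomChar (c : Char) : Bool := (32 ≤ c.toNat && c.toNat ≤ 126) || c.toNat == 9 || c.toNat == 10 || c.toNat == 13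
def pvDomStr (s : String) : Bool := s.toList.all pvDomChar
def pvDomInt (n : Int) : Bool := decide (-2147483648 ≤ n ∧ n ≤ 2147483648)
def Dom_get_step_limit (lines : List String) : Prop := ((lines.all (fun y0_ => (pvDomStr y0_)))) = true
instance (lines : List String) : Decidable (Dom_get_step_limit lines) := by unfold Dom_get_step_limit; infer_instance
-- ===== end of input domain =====

-- B replaces A's monotonic indent stack by a recursive descent over the implied
-- nested-block tree (objective: alternative decomposition, same cost).

-- ===== PORT A =====

-- shared by both ports: the indent of a line and the loop-header test,
-- exactly as both Python versions compute them
def lineIndent (l : String) : Int :=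
  PySem.Str.len l - PySem.Str.len (PySem.Str.lstrip l)

def isLoop (l : String) : Bool :=
  PySem.Str.startswith (PySem.Str.lstrip l) "for" ||
  PySem.Str.startswith (PySem.Str.lstrip l) "while"

-- `while indents and indent <= indents[-1]: indents.pop()`
def popTail (s : List Int) (i : Int) : List Int :=
  if h : s = [] then s
  else if i ≤ s.getLast h then popTail s.dropLast i else s
termination_by s.length
decreasing_by
  have := List.length_pos_of_ne_nil h
  simp [List.length_dropLast]; omega

def stepA (st : Int × List Int) (line : String) : Int × List Int :=
  let indents := popTail st.2 (lineIndent line)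
  let sl := st.1 + 2 ^ indents.length
  if isLoop line then
    (sl + 2 ^ (indents ++ [lineIndent line]).length, indents ++ [lineIndent line])
  else (sl, indents)

def get_step_limit (lines : List String) : Int :=
  (lines.foldl stepA (1, ([] : List Int))).1

-- ===== PORT B =====

-- `block(i, depth, thresh)` of Source B; the line list plays the role of the index
-- cursor, `total` is the loop's accumulator (the while loop becomes this
-- structural recursion over the same state), and `fuel` (initially the number
-- of lines) only makes the nested recursion structurally terminating — it is
-- never exhausted.
def blockB (fuel : Nat) (lines : List String) (depth : Nat) (thresh : Int)
    (total : Int) : Int × List String :=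
  match fuel, lines with
  | 0, ls => (total, ls)
  | _ + 1, [] => (total, [])
  | f + 1, l :: ls =>
    if lineIndent l ≤ thresh then (total, l :: ls)
    else if isLoop l then
      let sj := blockB f ls (depth + 1) (lineIndent l) 0
      blockB f sj.2 depth thresh (total + 2 ^ depth + 2 ^ (depth + 1) + sj.1)
    else
      blockB f ls depth thresh (total + 2 ^ depth)

def get_step_limit_alt (lines : List String) : Int :=
  1 + (blockB lines.length lines 0 (-1) 0).1

-- ===== PRECONDITION & SPEC =====
def Spec_get_step_limit (lines : List String) (out : Int) : Prop := out = get_step_limit_alt lines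
instance (lines : List String) (out : Int) : Decidable (Spec_get_step_limit lines out) := by unfold Spec_get_step_limit; infer_instance

-- ===== CLAIM =====
def Claim_equal_get_step_limit : Prop :=
  ∀ (lines : List String), Dom_get_step_limit lines → Spec_get_step_limit lines (get_step_limit lines)

-- ===== LEMMAS AND PROOFS =====

-- proof-side, accumulator-free form of blockB
def blockR (fuel : Nat) (lines : List String) (depth : Nat) (thresh : Int) :
    Int × List String :=
  match fuel, lines with
  | 0, ls => (0, ls)
  | _ + 1, [] => (0, [])
  | f + 1, l :: ls =>
    if lineIndent l ≤ thresh then (0, l :: ls)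
    else if isLoop l then
      let sj := blockR f ls (depth + 1) (lineIndent l)
      let rk := blockR f sj.2 depth thresh
      (2 ^ depth + 2 ^ (depth + 1) + sj.1 + rk.1, rk.2)
    else
      let rk := blockR f ls depth thresh
      (2 ^ depth + rk.1, rk.2)

theorem blockB_eq (fuel : Nat) : ∀ (ls : List String) (d : Nat) (t total : Int),
    blockB fuel ls d t total = (total + (blockR fuel ls d t).1, (blockR fuel ls d t).2) := by
  induction fuel with
  | zero => intro ls d t total; simp [blockB, blockR]
  | succ f ih =>
    intro ls d t total
    cases ls with
    | nil => simp [blockB, blockR]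
    | cons l ls' =>
      simp only [blockB, blockR]
      split
      · simp
      · split
        · rw [ih ls' (d + 1) (lineIndent l) 0, ih]
          simp only [zero_add]
          rw [Prod.mk.injEq]
          exact ⟨by ring, rfl⟩
        · rw [ih ls' d t]
          rw [Prod.mk.injEq]
          exact ⟨by ring, rfl⟩

-- the top of A's stack, reversed representation (top first); -1 = empty
def topD : List Int → Int
  | [] => -1
  | t :: _ => t

-- B's total contribution seen from A's (reversed) stack r
def go (r : List Int) (ls : List String) : Int :=
  match r with
  | [] => (blockR ls.length ls 0 (-1)).1
  | t :: r' =>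
    let p := blockR ls.length ls (r'.length + 1) t
    p.1 + go r' p.2

theorem indent_nonneg (l : String) : 0 ≤ lineIndent l := by
  simp [lineIndent, PySem.Str.len_eq, PySem.Str.toList_lstrip, PySem.Chars.lstrip]
  exact le_trans (List.length_dropWhile_le _ _) (by simp)

theorem blockR_nil (f : Nat) (d : Nat) (t : Int) : blockR f [] d t = (0, []) := by
  cases f <;> rfl

theorem blockR_rest_le (f : Nat) : ∀ (ls : List String) (d : Nat) (t : Int),
    (blockR f ls d t).2.length ≤ ls.length := by
  induction f with
  | zero => intro ls d t; simp [blockR]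
  | succ f ih =>
    intro ls d t
    cases ls with
    | nil => simp [blockR]
    | cons l ls' =>
      simp only [blockR]
      split
      · simp
      · split
        · have h1 := ih ls' (d + 1) (lineIndent l)
          have h2 := ih (blockR f ls' (d + 1) (lineIndent l)).2 d t
          simpa using le_trans h2 (le_trans h1 (Nat.le_succ _))
        · have := ih ls' d t
          simpa using le_trans this (Nat.le_succ _)

theorem blockR_fuel (f1 : Nat) : ∀ (f2 : Nat) (ls : List String) (d : Nat) (t : Int),
    ls.length ≤ f1 → ls.length ≤ f2 → blockR f1 ls d t = blockR f2 ls d t := by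
  induction f1 with
  | zero =>
    intro f2 ls d t h1 _
    have : ls = [] := List.eq_nil_of_length_eq_zero (Nat.le_zero.mp h1)
    subst this; simp [blockR_nil]
  | succ f ih =>
    intro f2 ls d t h1 h2
    cases ls with
    | nil => simp [blockR_nil]
    | cons l ls' =>
      cases f2 with
      | zero => simp at h2
      | succ f2' =>
        simp only [List.length_cons, Nat.succ_le_succ_iff] at h1 h2
        simp only [blockR]
        split
        · rfl
        · split
          · have e1 : blockR f ls' (d + 1) (lineIndent l) = blockR f2' ls' (d + 1) (lineIndent l) :=
              ih f2' ls' (d + 1) (lineIndent l) h1 h2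
            rw [e1]
            have hlen := blockR_rest_le f2' ls' (d + 1) (lineIndent l)
            have e2 : blockR f (blockR f2' ls' (d + 1) (lineIndent l)).2 d t
                    = blockR f2' (blockR f2' ls' (d + 1) (lineIndent l)).2 d t :=
              ih f2' _ d t (le_trans hlen h1) (le_trans hlen h2)
            rw [e2]
          · rw [ih f2' ls' d t h1 h2]

theorem go_nil (r : List Int) : go r [] = 0 := by
  induction r with
  | nil => simp [go, blockR_nil]
  | cons t r' ih => simp [go, blockR_nil, ih]

theorem popTail_nil (i : Int) : popTail [] i = [] := by
  unfold popTail; simp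

theorem popTail_concat_le (s : List Int) (t i : Int) (h : i ≤ t) :
    popTail (s ++ [t]) i = popTail s i := by
  conv_lhs => rw [popTail]
  simp [h]

theorem popTail_concat_gt (s : List Int) (t i : Int) (h : ¬ i ≤ t) :
    popTail (s ++ [t]) i = s ++ [t] := by
  conv_lhs => rw [popTail]
  simp [h]

theorem stepA_loop (acc : Int) (s : List Int) (l : String) (h : isLoop l = true) :
    stepA (acc, s) l = (acc + 2 ^ (popTail s (lineIndent l)).length
                            + 2 ^ ((popTail s (lineIndent l)).length + 1),
                        popTail s (lineIndent l) ++ [lineIndent l]) := by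
  simp [stepA, h]

theorem stepA_nonloop (acc : Int) (s : List Int) (l : String) (h : ¬ isLoop l = true) :
    stepA (acc, s) l = (acc + 2 ^ (popTail s (lineIndent l)).length,
                        popTail s (lineIndent l)) := by
  simp [stepA, h]

theorem go_cons (t : Int) (r' : List Int) (ls : List String) :
    go (t :: r') ls = (blockR ls.length ls (r'.length + 1) t).1
                      + go r' (blockR ls.length ls (r'.length + 1) t).2 := by
  simp [go]

theorem main_lemma (n : Nat) : ∀ (ls : List String), ls.length ≤ n →
    ∀ (r : List Int) (acc : Int),
    (List.foldl stepA (acc, r.reverse) ls).1 = acc + go r ls := by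
  induction n with
  | zero =>
    intro ls h r acc
    have : ls = [] := List.eq_nil_of_length_eq_zero (Nat.le_zero.mp h)
    subst this; simp [go_nil]
  | succ n ih =>
    intro ls h r acc
    cases ls with
    | nil => simp [go_nil]
    | cons l ls' =>
      simp only [List.length_cons, Nat.succ_le_succ_iff] at h
      induction r generalizing acc with
      | nil =>
        have hind : ¬ lineIndent l ≤ (-1 : Int) := by
          have := indent_nonneg l; omega
        simp only [List.foldl_cons, List.reverse_nil]
        by_cases hl : isLoop l = true
        · rw [stepA_loop acc [] l hl, popTail_nil]
          have hi := ih ls' h [lineIndent l] (acc + 2 ^ ([] : List Int).length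
                       + 2 ^ (([] : List Int).length + 1))
          simp only [List.reverse_cons, List.reverse_nil, List.nil_append] at hi
          rw [show ([] : List Int) ++ [lineIndent l] = [lineIndent l] from rfl, hi]
          simp only [go, List.length_cons, List.length_nil, blockR]
          rw [if_neg hind, if_pos hl]
          have hfe : blockR (blockR ls'.length ls' 1 (lineIndent l)).2.length
                       (blockR ls'.length ls' 1 (lineIndent l)).2 0 (-1)
                   = blockR ls'.length (blockR ls'.length ls' 1 (lineIndent l)).2 0 (-1) :=
            blockR_fuel _ _ _ _ _ (le_refl _) (blockR_rest_le _ _ _ _)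
          rw [hfe]; ring
        · rw [stepA_nonloop acc [] l hl, popTail_nil]
          have hi := ih ls' h [] (acc + 2 ^ ([] : List Int).length)
          simp only [List.reverse_nil] at hi
          rw [hi]
          simp only [go, List.length_cons, List.length_nil, blockR]
          rw [if_neg hind, if_neg hl]
          ring
      | cons t r' ihr =>
        simp only [List.foldl_cons, List.reverse_cons]
        by_cases hle : lineIndent l ≤ t
        · -- A pops t; B's block at threshold t returns immediately
          have hstep : stepA (acc, r'.reverse ++ [t]) l = stepA (acc, r'.reverse) l := by
            by_cases hl : isLoop l = true
            · rw [stepA_loop _ _ _ hl, stepA_loop _ _ _ hl, popTail_concat_le _ _ _ hle]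
            · rw [stepA_nonloop _ _ _ hl, stepA_nonloop _ _ _ hl, popTail_concat_le _ _ _ hle]
          have hi := ihr acc
          simp only [List.foldl_cons] at hi
          rw [hstep, hi, go_cons]
          simp only [List.length_cons, blockR]
          rw [if_pos hle]
          simp
        · -- no pop: the line belongs to the block headed by t
          rw [show r'.reverse ++ [t] = (t :: r').reverse from by simp]
          by_cases hl : isLoop l = true
          · rw [stepA_loop acc _ l hl]
            rw [show popTail (t :: r').reverse (lineIndent l) = (t :: r').reverse from by
              simpa using popTail_concat_gt r'.reverse t (lineIndent l) hle]
            rw [show (t :: r').reverse ++ [lineIndent l] = (lineIndent l :: t :: r').reverse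
              from by simp]
            have hi := ih ls' h (lineIndent l :: t :: r')
              (acc + 2 ^ (t :: r').reverse.length + 2 ^ ((t :: r').reverse.length + 1))
            rw [hi]
            conv_rhs => rw [go_cons]
            simp only [List.length_cons, List.length_reverse, blockR]
            rw [if_neg hle, if_pos hl]
            rw [go_cons, go_cons]
            have hfe : blockR (blockR ls'.length ls' (r'.length + 1 + 1) (lineIndent l)).2.length
                         (blockR ls'.length ls' (r'.length + 1 + 1) (lineIndent l)).2
                         (r'.length + 1) t
                     = blockR ls'.length (blockR ls'.length ls' (r'.length + 1 + 1) (lineIndent l)).2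
                         (r'.length + 1) t :=
              blockR_fuel _ _ _ _ _ (le_refl _) (blockR_rest_le _ _ _ _)
            simp only [List.length_cons]
            rw [hfe]
            ring
          · rw [stepA_nonloop acc _ l hl]
            rw [show popTail (t :: r').reverse (lineIndent l) = (t :: r').reverse from by
              simpa using popTail_concat_gt r'.reverse t (lineIndent l) hle]
            rw [ih ls' h (t :: r') (acc + 2 ^ (t :: r').reverse.length)]
            conv_rhs => rw [go_cons]
            simp only [List.length_cons, List.length_reverse, blockR]
            rw [if_neg hle, if_neg hl]
            rw [go_cons]
            ring

-- ===== VERDICT =====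
theorem get_step_limit_spec : Claim_equal_get_step_limit := by
  intro lines _
  unfold Spec_get_step_limit get_step_limit get_step_limit_alt
  rw [blockB_eq]
  have := main_lemma lines.length lines (le_refl _) [] 1
  simpa [go] using this
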